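-- pv_equiv track=rewrite | github.com/mark-ni/competitive-programming | codeforces/20.01.05.C.py | solve
-- ===== SOURCE A (Python) =====
-- def solve(permut,numFactors):
--     currentMin = 10**9
--     goodProd1 = 0
--     goodProd2 = 0
--     for i in range(numFactors+1):
--         prod1 = 1
--         prod2 = 1
--         for j in range(0,i):
--             prod1 *= permut[j]
--         for j in range(i,numFactors):
--             prod2 *= permut[j]
--         if max(prod1,prod2)<currentMin:
--             currentMin = max(prod1, prod2)
--             goodProd1 = prod1
--             goodProd2 = prod2
--     return currentMin,goodProd1,goodProd2
-- ===== SOURCE B (Python) =====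
-- def solve(permut, numFactors):
--     # O(n): build suffix products once, then one sweep with a running prefix product.
--     sufs = [1]
--     for j in range(numFactors - 1, -1, -1):
--         sufs.append(sufs[-1] * permut[j])
--     sufs.reverse()  # sufs[i] == product of permut[i:numFactors]
--     currentMin, goodProd1, goodProd2 = 10**9, 0, 0
--     pre = 1
--     for i in range(numFactors + 1):
--         p2 = sufs[i]
--         m = pre if pre > p2 else p2
--         if m < currentMin:
--             currentMin, goodProd1, goodProd2 = m, pre, p2
--         if i < numFactors:
--             pre *= permut[i]
--     return currentMin, goodProd1, goodProd2
-- ===== Notes on version B (the rewrite author's own statement) =====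
-- stated objective: faster
-- what changed: Replaces the quadratic recomputation of both products at every split point by one precomputed suffix-product list plus a running prefix product, a single O(n) sweep.
import Mathlib
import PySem

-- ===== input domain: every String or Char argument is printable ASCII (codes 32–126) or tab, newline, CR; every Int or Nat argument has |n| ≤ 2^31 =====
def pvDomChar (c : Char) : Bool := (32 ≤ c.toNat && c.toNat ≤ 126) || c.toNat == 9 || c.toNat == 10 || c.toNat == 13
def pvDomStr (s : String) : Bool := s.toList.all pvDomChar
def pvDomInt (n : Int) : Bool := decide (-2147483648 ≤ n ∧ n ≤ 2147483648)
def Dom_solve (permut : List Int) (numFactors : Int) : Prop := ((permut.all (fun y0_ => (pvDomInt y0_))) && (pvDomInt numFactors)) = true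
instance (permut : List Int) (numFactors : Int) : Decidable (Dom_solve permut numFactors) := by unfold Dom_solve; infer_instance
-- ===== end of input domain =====

-- B replaces A's quadratic per-split product recomputation with a precomputed suffix-product
-- list and a running prefix product: one O(n) sweep (objective: faster, asymptotic).


-- ===== PORT A =====
def solve (permut : List Int) (numFactors : Int) : Int × Int × Int :=
  (PySem.List.pyRange 0 (numFactors + 1) 1).foldl
    (fun (st : Int × Int × Int) i =>
      let prod1 := (PySem.List.pyRange 0 i 1).foldl
        (fun p j => p * PySem.List.pyGetD permut j 1) 1
      let prod2 := (PySem.List.pyRange i numFactors 1).foldl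
        (fun p j => p * PySem.List.pyGetD permut j 1) 1
      if max prod1 prod2 < st.1 then (max prod1 prod2, prod1, prod2) else st)
    (10 ^ 9, 0, 0)

-- ===== PORT B =====
-- 'sufs.append(sufs[-1] * permut[j])' then in-place 'reverse' is the fold with ++ [·], then .reverse;
-- list indexing is pyGetD (default 1; Pre_ keeps every index in range in Python).
def solve_alt (permut : List Int) (numFactors : Int) : Int × Int × Int :=
  let sufs : List Int :=
    ((PySem.List.pyRange (numFactors - 1) (-1) (-1)).foldl
      (fun acc j => acc ++ [acc.getLastD 1 * PySem.List.pyGetD permut j 1]) [1]).reverse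
  ((PySem.List.pyRange 0 (numFactors + 1) 1).foldl
    (fun (st : Int × (Int × Int × Int)) i =>
      let pre := st.1
      let p2 := PySem.List.pyGetD sufs i 1
      let m := if pre > p2 then pre else p2
      let best := if m < st.2.1 then (m, pre, p2) else st.2
      let pre' := if i < numFactors then pre * PySem.List.pyGetD permut i 1 else pre
      (pre', best))
    (1, (10 ^ 9, 0, 0))).2

-- ===== PRECONDITION & SPEC =====
-- Pre_ excludes only numFactors > len(permut): there both Pythons raise IndexError (permut[j] out of range).
def Pre_solve (permut : List Int) (numFactors : Int) : Prop :=
  numFactors ≤ permut.length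
instance (permut : List Int) (numFactors : Int) : Decidable (Pre_solve permut numFactors) := by
  unfold Pre_solve; infer_instance
def pvWitness_solve : List Int × Int := ([2, 3], 2)
def Spec_solve (permut : List Int) (numFactors : Int) (out : Int × Int × Int) : Prop := out = solve_alt permut numFactors
instance (permut : List Int) (numFactors : Int) (out : Int × Int × Int) : Decidable (Spec_solve permut numFactors out) := by unfold Spec_solve; infer_instance

-- ===== CLAIM (what is proved, stated in full; the proofs are below) =====
def Claim_equal_solve : Prop := ∀ (permut : List Int) (numFactors : Int), Dom_solve permut numFactors → Pre_solve permut numFactors → Spec_solve permut numFactors (solve permut numFactors)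

-- ===== LEMMAS AND PROOFS =====

-- element access as both programs see it (pyGetD with default 1; Pre_ keeps indices in range in Python)
def pvG (permut : List Int) (j : Int) : Int := PySem.List.pyGetD permut j 1
-- prefix product of permut[0:k] and suffix product of permut[k:n]
def pvPref (permut : List Int) (k : Nat) : Int := ((List.range k).map (fun (t : Nat) => pvG permut (t : Int))).prod
def pvSuff (permut : List Int) (n k : Nat) : Int := ((List.range' k (n - k)).map (fun (t : Nat) => pvG permut (t : Int))).prod
-- the common candidate-update step both programs perform at split point k
def pvStep (st : Int × Int × Int) (p1 p2 : Int) : Int × Int × Int :=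
  if max p1 p2 < st.1 then (max p1 p2, p1, p2) else st
-- B's sweep step, after the suffix list and the indexing have been resolved
def pvBStep (permut : List Int) (n : Nat) (st : Int × (Int × Int × Int)) (k : Nat) : Int × (Int × Int × Int) :=
  (if k < n then st.1 * pvG permut (k : Int) else st.1, pvStep st.2 st.1 (pvSuff permut n k))

lemma pvFoldMul (l : List Int) (g : Int → Int) (init : Int) :
    l.foldl (fun p j => p * g j) init = init * (l.map g).prod := by
  induction l generalizing init with
  | nil => simp
  | cons x t ih => simp [List.foldl, ih, mul_assoc]

lemma pvPref_succ (permut : List Int) (k : Nat) :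
    pvPref permut (k + 1) = pvPref permut k * pvG permut (k : Int) := by
  simp [pvPref, List.range_succ]

lemma pvSuff_self (permut : List Int) (n : Nat) : pvSuff permut n n = 1 := by
  simp [pvSuff]

lemma pvSuff_pred (permut : List Int) (n k : Nat) (h : k < n) :
    pvSuff permut n k = pvG permut (k : Int) * pvSuff permut n (k + 1) := by
  have hnk : n - k = (n - (k + 1)) + 1 := by omega
  rw [pvSuff, hnk, List.range'_succ]
  simp [pvSuff]

-- A computes, for each split point k, the two products afresh: its fold is the reference fold
lemma solveA_eq (permut : List Int) (n : Nat) :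
    solve permut (n : Int)
      = (List.range (n + 1)).foldl (fun st k => pvStep st (pvPref permut k) (pvSuff permut n k)) (10 ^ 9, 0, 0) := by
  unfold solve
  have h1 : PySem.List.pyRange 0 ((n : Int) + 1) 1 = (List.range (n + 1)).map (fun (k : Nat) => ((0 : Int) + (k : Int))) := by
    have ht : ((n : Int) + 1 - 0).toNat = n + 1 := by omega
    rw [PySem.List.pyRange_one, ht]
  rw [h1, List.foldl_map]
  apply PySem.List.foldl_congr_mem
  intro st k hk
  have hkn : k ≤ n := by
    have := List.mem_range.mp hk
    omega
  have hp1 : (PySem.List.pyRange 0 ((0 : Int) + (k : Int)) 1).foldl (fun p j => p * PySem.List.pyGetD permut j 1) 1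
      = pvPref permut k := by
    have ht : ((k : Int) - 0).toNat = k := by omega
    rw [pvFoldMul, one_mul, zero_add, PySem.List.pyRange_one, ht, List.map_map]
    unfold pvPref
    congr 1
    apply List.map_congr_left
    intro t _
    simp [pvG]
  have hp2 : (PySem.List.pyRange ((0 : Int) + (k : Int)) (n : Int) 1).foldl (fun p j => p * PySem.List.pyGetD permut j 1) 1
      = pvSuff permut n k := by
    have h2 : ((n : Int) - (k : Int)).toNat = n - k := by omega
    rw [pvFoldMul, one_mul, zero_add, PySem.List.pyRange_one, h2, List.map_map]
    unfold pvSuff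
    rw [List.range'_eq_map_range, List.map_map]
    congr 1
  simp only [hp1, hp2]
  rfl

-- the suffix-product list B builds (append-then-reverse) is exactly [pvSuff n 0, …, pvSuff n n]
lemma sufs_build (permut : List Int) (n : Nat) :
    ((PySem.List.pyRange ((n : Int) - 1) (-1) (-1)).foldl
        (fun acc j => acc ++ [acc.getLastD 1 * PySem.List.pyGetD permut j 1]) [1]).reverse
      = (List.range (n + 1)).map (fun s => pvSuff permut n s) := by
  have key : ∀ m, m ≤ n →
      (List.range m).foldl (fun (acc : List Int) (t : Nat) => acc ++ [acc.getLastD 1 * PySem.List.pyGetD permut ((n : Int) - 1 - (t : Int)) 1]) [1]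
        = (List.range (m + 1)).map (fun s => pvSuff permut n (n - s)) := by
    intro m
    induction m with
    | zero =>
      intro _
      simp [pvSuff_self]
    | succ m ih =>
      intro hm
      rw [List.range_succ, List.foldl_append, ih (by omega)]
      simp only [List.foldl_cons, List.foldl_nil]
      have hlast : ((List.range (m + 1)).map (fun s => pvSuff permut n (n - s))).getLastD 1 = pvSuff permut n (n - m) := by
        rw [List.range_succ, List.map_append]
        exact List.getLastD_concat
      rw [hlast]
      have hel : pvSuff permut n (n - m) * PySem.List.pyGetD permut ((n : Int) - 1 - (m : Int)) 1
          = pvSuff permut n (n - (m + 1)) := by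
        have hc : ((n : Int) - 1 - (m : Int)) = ((n - (m + 1) : Nat) : Int) := by push_cast [Nat.cast_sub (by omega : m + 1 ≤ n)]; ring
        rw [hc, pvSuff_pred permut n (n - (m + 1)) (by omega)]
        have h3 : n - (m + 1) + 1 = n - m := by omega
        rw [h3]
        unfold pvG
        ring
      rw [hel]
      rw [List.range_succ (n := m + 1), List.map_append]
      simp
  have h0 : PySem.List.pyRange ((n : Int) - 1) (-1) (-1) = (List.range n).map (fun (t : Nat) => (n : Int) - 1 - (t : Int)) := by
    have ht : ((n : Int) - 1 - (-1)).toNat = n := by omega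
    rw [PySem.List.pyRange_neg_one]
    norm_num [ht]
  simp only [h0, List.foldl_map]
  rw [key n le_rfl]
  apply List.ext_getElem
  · simp
  · intro i h1 h2
    simp only [List.length_map, List.length_range] at h1 h2
    rw [List.getElem_reverse, List.getElem_map, List.getElem_map, List.getElem_range, List.getElem_range]
    congr 1
    simp only [List.length_map, List.length_range]
    omega

-- B's single sweep: the running prefix product is pvPref at every index
lemma bloop (permut : List Int) (n : Nat) :
    ∀ (m a : Nat), a + m = n + 1 → ∀ (st : Int × Int × Int),
    ((List.range' a m).foldl (pvBStep permut n) (pvPref permut a, st)).2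
      = (List.range' a m).foldl (fun st k => pvStep st (pvPref permut k) (pvSuff permut n k)) st := by
  intro m
  induction m with
  | zero =>
    intro a _ st
    simp
  | succ m ih =>
    intro a ha st
    rw [List.range'_succ, List.foldl_cons, List.foldl_cons]
    by_cases ha' : a < n
    · have : pvBStep permut n (pvPref permut a, st) a
          = (pvPref permut (a + 1), pvStep st (pvPref permut a) (pvSuff permut n a)) := by
        simp [pvBStep, ha', pvPref_succ]
      rw [this, ih (a + 1) (by omega)]
    · have han : a = n := by omega
      have hm0 : m = 0 := by omega
      subst han
      subst hm0
      simp [pvBStep]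

lemma solveB_eq (permut : List Int) (n : Nat) :
    solve_alt permut (n : Int)
      = (List.range (n + 1)).foldl (fun st k => pvStep st (pvPref permut k) (pvSuff permut n k)) (10 ^ 9, 0, 0) := by
  unfold solve_alt
  rw [sufs_build]
  have h1 : PySem.List.pyRange 0 ((n : Int) + 1) 1 = (List.range (n + 1)).map (fun (k : Nat) => ((0 : Int) + (k : Int))) := by
    have ht : ((n : Int) + 1 - 0).toNat = n + 1 := by omega
    rw [PySem.List.pyRange_one, ht]
  rw [h1]
  simp only [List.foldl_map]
  have hcongr : (List.range (n + 1)).foldl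
      (fun (st : Int × (Int × Int × Int)) (k : Nat) =>
        let pre := st.1
        let p2 := PySem.List.pyGetD ((List.range (n + 1)).map (fun s => pvSuff permut n s)) ((0 : Int) + (k : Int)) 1
        let m := if pre > p2 then pre else p2
        let best := if m < st.2.1 then (m, pre, p2) else st.2
        let pre' := if ((0 : Int) + (k : Int)) < (n : Int) then pre * PySem.List.pyGetD permut ((0 : Int) + (k : Int)) 1 else pre
        (pre', best))
      (1, (10 ^ 9, 0, 0))
      = (List.range (n + 1)).foldl (pvBStep permut n) (1, (10 ^ 9, 0, 0)) := by
    apply PySem.List.foldl_congr_mem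
    intro st k hk
    have hkn : k ≤ n := by
      have := List.mem_range.mp hk
      omega
    have hget : PySem.List.pyGetD ((List.range (n + 1)).map (fun s => pvSuff permut n s)) ((k : Int)) 1
        = pvSuff permut n k := by
      rw [PySem.List.pyGetD_natCast]
      exact PySem.List.getD_map_range _ _ _ _ (by omega)
    have hmax : (if st.1 > pvSuff permut n k then st.1 else pvSuff permut n k)
        = max st.1 (pvSuff permut n k) := by
      rw [max_def]
      split_ifs <;> omega
    simp only [zero_add, hget]
    unfold pvBStep pvStep pvG
    rw [hmax]
    simp [Nat.cast_lt]
  rw [hcongr]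
  have hb := bloop permut n (n + 1) 0 (by omega) (10 ^ 9, 0, 0)
  have hp0 : pvPref permut 0 = 1 := by simp [pvPref]
  rw [hp0] at hb
  rw [List.range_eq_range']
  exact hb

-- negative numFactors: both loops run zero times and the initial triple falls through
lemma solveA_neg (permut : List Int) (numFactors : Int) (h : numFactors < 0) :
    solve permut numFactors = (10 ^ 9, 0, 0) := by
  unfold solve
  rw [PySem.List.pyRange_one_eq_nil (by omega)]
  rfl

lemma solveB_neg (permut : List Int) (numFactors : Int) (h : numFactors < 0) :
    solve_alt permut numFactors = (10 ^ 9, 0, 0) := by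
  unfold solve_alt
  rw [PySem.List.pyRange_one_eq_nil (a := (0 : Int)) (b := numFactors + 1) (by omega)]
  rfl

-- ===== VERDICT (by name: the statement is the Claim_ definition above) =====
theorem solve_spec : Claim_equal_solve := by
  intro permut numFactors _ _
  unfold Spec_solve
  rcases Int.lt_or_le numFactors 0 with hneg | hpos
  · rw [solveA_neg permut numFactors hneg, solveB_neg permut numFactors hneg]
  · obtain ⟨n, rfl⟩ : ∃ n : Nat, numFactors = (n : Int) := ⟨numFactors.toNat, (Int.toNat_of_nonneg hpos).symm⟩
    rw [solveA_eq, solveB_eq]
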